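-- pv_equiv track=rewrite | github.com/PeterWolf-tw/ESOE-CS101-2016 | homework03_b05505037.py | condXOR
-- ===== SOURCE A (Python) =====
-- def condXOR(inputSTR_X, inputSTR_Y):
--     outputSTR = ""
--     for i in inputSTR_X:
--         if i == "1":
--             for j in inputSTR_Y:
--                 if j == "0":
--                     outputSTR = outputSTR + "1"
--                 else:
--                     outputSTR = outputSTR + "0"
--         else:
--             for j in inputSTR_Y:
--                 if j == "0":
--                     outputSTR = outputSTR + "0"
--                 else:
--                     outputSTR = outputSTR + "1"
--     return outputSTR
-- ===== SOURCE B (Python) =====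
-- def condXOR(inputSTR_X, inputSTR_Y):
--     norm = ''.join('0' if j == '0' else '1' for j in inputSTR_Y)
--     comp = ''.join('1' if c == '0' else '0' for c in norm)
--     return ''.join(comp if i == '1' else norm for i in inputSTR_X)
-- ===== Notes on version B (the rewrite author's own statement) =====
-- stated objective: faster
-- what changed: Precompute the two possible per-X-char output blocks (normalized Y and its complement) once, then a single pass over X selects blocks joined at the end, instead of re-scanning Y character by character with quadratic string concatenation inside the X loop.
import Mathlib
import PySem

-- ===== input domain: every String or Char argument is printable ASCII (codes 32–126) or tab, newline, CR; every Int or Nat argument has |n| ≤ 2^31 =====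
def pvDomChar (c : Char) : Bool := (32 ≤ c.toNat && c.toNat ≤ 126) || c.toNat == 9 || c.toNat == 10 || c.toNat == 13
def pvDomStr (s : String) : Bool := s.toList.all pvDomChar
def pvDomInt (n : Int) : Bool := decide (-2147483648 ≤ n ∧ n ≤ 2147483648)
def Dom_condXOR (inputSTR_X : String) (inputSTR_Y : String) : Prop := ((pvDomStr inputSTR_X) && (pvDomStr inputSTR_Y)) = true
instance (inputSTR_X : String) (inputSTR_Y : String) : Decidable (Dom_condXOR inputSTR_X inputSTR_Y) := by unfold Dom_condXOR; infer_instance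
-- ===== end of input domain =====

-- B hoists the two per-character-of-X output blocks out of the inner loop: it builds the normalized Y and its complement once and joins selected blocks in one pass over X (constant-factor faster; return value only, no side effects).
-- ===== PORT A =====
def condXOR (inputSTR_X : String) (inputSTR_Y : String) : String :=
  inputSTR_X.toList.foldl (fun outputSTR i =>
    if i = '1' then
      inputSTR_Y.toList.foldl (fun o j => if j = '0' then o ++ "1" else o ++ "0") outputSTR
    else
      inputSTR_Y.toList.foldl (fun o j => if j = '0' then o ++ "0" else o ++ "1") outputSTR) ""

-- ===== PORT B =====
def condXOR_alt (inputSTR_X : String) (inputSTR_Y : String) : String :=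
  let norm := String.ofList (inputSTR_Y.toList.map (fun j => if j = '0' then '0' else '1'))
  let comp := String.ofList (norm.toList.map (fun c => if c = '0' then '1' else '0'))
  String.join (inputSTR_X.toList.map (fun i => if i = '1' then comp else norm))

-- ===== PRECONDITION & SPEC =====
def Spec_condXOR (inputSTR_X : String) (inputSTR_Y : String) (out : String) : Prop := out = condXOR_alt inputSTR_X inputSTR_Y
instance (inputSTR_X : String) (inputSTR_Y : String) (out : String) : Decidable (Spec_condXOR inputSTR_X inputSTR_Y out) := by unfold Spec_condXOR; infer_instance

-- ===== CLAIM (what is proved, stated in full; the proofs are below) =====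
def Claim_equal_condXOR : Prop := ∀ (inputSTR_X : String) (inputSTR_Y : String), Dom_condXOR inputSTR_X inputSTR_Y → Spec_condXOR inputSTR_X inputSTR_Y (condXOR inputSTR_X inputSTR_Y)

-- ===== LEMMAS AND PROOFS =====

lemma join_cons_str (s : String) (l : List String) :
    String.join (s :: l) = s ++ String.join l := by
  simp [String.join_eq, String.ofList_append]

lemma inner_foldl (f : Char → Char) (ys : List Char) (out : String)
    (step : String → Char → String)
    (hstep : ∀ o j, step o j = o ++ String.ofList [f j]) :
    ys.foldl step out = out ++ String.ofList (ys.map f) := by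
  induction ys generalizing out with
  | nil => simp
  | cons y ys ih =>
    simp only [List.foldl_cons, List.map_cons, hstep, ih]
    rw [String.append_assoc, ← String.ofList_append, List.singleton_append]

lemma outer_foldl (xs ys : List Char) (out : String) :
    xs.foldl (fun outputSTR i =>
      if i = '1' then
        ys.foldl (fun o j => if j = '0' then o ++ "1" else o ++ "0") outputSTR
      else
        ys.foldl (fun o j => if j = '0' then o ++ "0" else o ++ "1") outputSTR) out
    = out ++ String.join (xs.map (fun i =>
        if i = '1' then String.ofList (ys.map (fun j => if j = '0' then '1' else '0'))
        else String.ofList (ys.map (fun j => if j = '0' then '0' else '1')))) := by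
  induction xs generalizing out with
  | nil => simp [String.join]
  | cons x xs ih =>
    simp only [List.foldl_cons, List.map_cons, join_cons_str]
    by_cases hx : x = '1'
    · rw [if_pos hx, if_pos hx,
        inner_foldl (fun j => if j = '0' then '1' else '0') ys out _
          (by intro o j; by_cases h : j = '0' <;> simp [h]),
        ih, String.append_assoc]
    · rw [if_neg hx, if_neg hx,
        inner_foldl (fun j => if j = '0' then '0' else '1') ys out _
          (by intro o j; by_cases h : j = '0' <;> simp [h]),
        ih, String.append_assoc]

-- ===== VERDICT (by name: the statement is the Claim_ definition above) =====
theorem condXOR_spec : Claim_equal_condXOR := by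
  intro X Y _
  unfold Spec_condXOR condXOR condXOR_alt
  have hcomp : ((Y.toList.map (fun j => if j = '0' then '0' else '1'))).map
      (fun c => if c = '0' then '1' else '0')
      = Y.toList.map (fun j => if j = '0' then '1' else '0') := by
    rw [List.map_map]
    apply List.map_congr_left
    intro j _
    by_cases h : j = '0' <;> simp [h]
  rw [outer_foldl]
  simp [String.toList_ofList, hcomp]
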